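-- pv_equiv track=rewrite | github.com/vaishnavi0307/DAA-Lab | Lab - 3/Codes/Q4 - Maximum Sum & their Subsets.py | find_max_sum_subsets
-- ===== SOURCE A (Python) =====
-- def find_max_sum_subsets(arr):
--     n = len(arr)
--     max_sum = float("-inf")
--     max_subsets = []
--
--     # Generate all possible subsets of the array
--     for i in range(1 << n):
--         subset = [arr[j] for j in range(n) if (i & (1 << j)) > 0]
--
--         # Calculate the sum of the current subset
--         current_sum = sum(subset)
--
--         # Check if the current sum is greater than the maximum sum
--         if current_sum > max_sum:
--             max_sum = current_sum
--             max_subsets = [subset]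
--         elif current_sum == max_sum:
--             max_subsets.append(subset)
--
--     return max_sum, max_subsets
-- ===== SOURCE B (Python) =====
-- def find_max_sum_subsets(arr):
--     # Max sum = sum of all positive elements; the achieving subsets are:
--     # all positives, plus any subset of the zero-valued elements.
--     # Build them by a right-to-left fold, which reproduces A's bitmask order.
--     max_sum = sum(v for v in arr if v > 0)
--     subsets = [[]]
--     for x in reversed(arr):
--         if x > 0:
--             subsets = [[x] + s for s in subsets]
--         elif x == 0:
--             subsets = [t for s in subsets for t in (s, [x] + s)]
--         # negative elements appear in no maximal subset
--     return max_sum, subsets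
-- ===== Notes on version B (the rewrite author's own statement) =====
-- stated objective: faster
-- what changed: Instead of enumerating all 2^n bitmask subsets and scanning for the maximum, B computes the maximum sum directly as the sum of the positive elements and builds the achieving subsets by one right-to-left fold (positives are forced in, zeros branch, negatives are dropped), which reproduces A's enumeration order.
import Mathlib
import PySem

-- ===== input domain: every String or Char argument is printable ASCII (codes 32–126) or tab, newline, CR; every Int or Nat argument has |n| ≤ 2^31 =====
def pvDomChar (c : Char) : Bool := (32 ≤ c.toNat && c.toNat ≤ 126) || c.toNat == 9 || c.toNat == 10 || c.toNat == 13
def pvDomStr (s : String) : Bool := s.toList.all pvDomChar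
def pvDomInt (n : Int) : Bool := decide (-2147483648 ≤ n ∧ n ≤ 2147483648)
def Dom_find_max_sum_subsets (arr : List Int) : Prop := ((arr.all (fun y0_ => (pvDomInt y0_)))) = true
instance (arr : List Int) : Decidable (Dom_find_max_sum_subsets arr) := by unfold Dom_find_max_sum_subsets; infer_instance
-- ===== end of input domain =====

-- B replaces A's scan over all 2^n bitmask subsets by the closed-form maximum (sum of the
-- positive elements) and one right-to-left fold generating the achieving subsets in A's order.

-- ===== PORT A =====
-- subset = [arr[j] for j in range(n) if (i & (1 << j)) > 0]; i comes from range(1 << n),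
-- so masks are nonnegative and kept as Nat; arr[j] with 0 ≤ j < len arr is exact as getD j 0.
def pvSubsetAt (arr : List Int) (i : Nat) : List Int :=
  ((List.range arr.length).filter (fun j => i &&& (1 <<< j) > 0)).map (fun j => arr.getD j 0)

-- the loop body; max_sum = float("-inf") is only a -∞ sentinel against integer sums,
-- ported as `none` (every int compares greater, exactly Python's int > -inf)
def pvStep (st : Option Int × List (List Int)) (subset : List Int) : Option Int × List (List Int) :=
  let current := subset.sum
  match st with
  | (none, _) => (some current, [subset])
  | (some m, subs) =>
    if current > m then (some current, [subset])
    else if current = m then (some m, subs ++ [subset])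
    else (some m, subs)

def find_max_sum_subsets (arr : List Int) : Int × List (List Int) :=
  let n := arr.length
  let res := (List.range (1 <<< n)).foldl (fun st i => pvStep st (pvSubsetAt arr i)) (none, [])
  -- range(1 << n) is nonempty, so the sentinel is always replaced: res.1 = some _
  (res.1.getD 0, res.2)

-- ===== PORT B =====
-- the 'for x in reversed(arr)' loop rebuilding `subsets` is the right fold over arr
def pvGen (arr : List Int) : List (List Int) :=
  arr.foldr
    (fun x subs =>
      if x > 0 then subs.map (fun s => x :: s)
      else if x = 0 then subs.flatMap (fun s => [s, x :: s])
      else subs)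
    [[]]

def find_max_sum_subsets_alt (arr : List Int) : Int × List (List Int) :=
  ((arr.filter (fun v => v > 0)).sum, pvGen arr)

-- ===== PRECONDITION & SPEC =====
def Spec_find_max_sum_subsets (arr : List Int) (out : Int × List (List Int)) : Prop := out = find_max_sum_subsets_alt arr
instance (arr : List Int) (out : Int × List (List Int)) : Decidable (Spec_find_max_sum_subsets arr out) := by unfold Spec_find_max_sum_subsets; infer_instance

-- ===== CLAIM (what is proved, stated in full; the proofs are below) =====
def Claim_equal_find_max_sum_subsets : Prop := ∀ (arr : List Int), Dom_find_max_sum_subsets arr → Spec_find_max_sum_subsets arr (find_max_sum_subsets arr)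

-- ===== LEMMAS AND PROOFS =====

-- sum of the positive elements: the maximum subset sum
def pvP (arr : List Int) : Int := (arr.filter (fun v => v > 0)).sum

-- the list of subsets A enumerates, in mask order
def pvL (arr : List Int) : List (List Int) :=
  (List.range (2 ^ arr.length)).map (pvSubsetAt arr)

-- A's mask test (i & (1 << j)) > 0 is the j-th bit of i
lemma pvCond_eq (i j : Nat) : (i &&& (1 <<< j) > 0) = i.testBit j := by
  rw [Nat.shiftLeft_eq, one_mul, Nat.and_two_pow]
  cases h : i.testBit j <;> simp [Nat.two_pow_pos]

lemma pvSubsetAt_cons (x : Int) (arr : List Int) (i : Nat) :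
    pvSubsetAt (x :: arr) i =
      (if i % 2 = 1 then x :: pvSubsetAt arr (i / 2) else pvSubsetAt arr (i / 2)) := by
  simp only [pvSubsetAt, pvCond_eq, List.length_cons, List.range_succ_eq_map,
    List.filter_cons, List.filter_map, Nat.testBit_zero]
  by_cases h : i % 2 = 1 <;>
    simp [h, Function.comp_def, Nat.testBit_add_one, Nat.succ_eq_add_one]

lemma pvRange_two_mul (N : Nat) :
    List.range (2 * N) = (List.range N).flatMap (fun m => [2 * m, 2 * m + 1]) := by
  induction N with
  | zero => rfl
  | succ n ih =>
    have h : 2 * (n+1) = (2*n) + 1 + 1 := by omega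
    rw [h, List.range_succ, List.range_succ, List.range_succ, List.flatMap_append, ← ih]
    simp

lemma pvL_cons (x : Int) (arr : List Int) :
    pvL (x :: arr) = (pvL arr).flatMap (fun s => [s, x :: s]) := by
  have h2 : 2 ^ (x :: arr).length = 2 * 2 ^ arr.length := by
    simp [List.length_cons, pow_succ]; ring
  rw [pvL, h2, pvRange_two_mul, List.map_flatMap, pvL, List.flatMap_map]
  apply List.flatMap_congr  -- maybe wrong name
  intro m hm
  have e1 : pvSubsetAt (x :: arr) (2*m) = pvSubsetAt arr m := by
    rw [pvSubsetAt_cons]; simp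
  have e2 : pvSubsetAt (x :: arr) (2*m+1) = x :: pvSubsetAt arr m := by
    rw [pvSubsetAt_cons]
    have : (2*m+1) % 2 = 1 := by omega
    have h2 : (2*m+1) / 2 = m := by omega
    simp [this, h2]
  simp [e1, e2]

lemma pvP_cons (x : Int) (arr : List Int) :
    pvP (x :: arr) = (if x > 0 then x + pvP arr else pvP arr) := by
  by_cases h : x > 0 <;> simp [pvP, List.filter_cons, h]

lemma pvL_ne_nil (arr : List Int) : pvL arr ≠ [] := by
  simp [pvL, List.range_eq_nil, Nat.pow_eq_zero]

lemma pvL_sum_le (arr : List Int) : ∀ s ∈ pvL arr, s.sum ≤ pvP arr := by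
  induction arr with
  | nil => intro s hs; simp [pvL, pvSubsetAt] at hs; simp [hs, pvP]
  | cons x arr ih =>
    intro s hs
    rw [pvL_cons] at hs
    simp only [List.mem_flatMap] at hs
    obtain ⟨t, ht, hst⟩ := hs
    have hts := ih t ht
    rw [pvP_cons]
    simp at hst
    rcases hst with rfl | rfl <;> by_cases hx : x > 0 <;> simp [hx] <;> omega

lemma pvL_mem_P (arr : List Int) : ∃ s ∈ pvL arr, s.sum = pvP arr := by
  induction arr with
  | nil => exact ⟨[], by simp [pvL, pvSubsetAt], by simp [pvP]⟩
  | cons x arr ih =>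
    obtain ⟨s, hs, hsum⟩ := ih
    rw [pvL_cons, pvP_cons]
    by_cases hx : x > 0
    · exact ⟨x :: s, by simp [List.mem_flatMap]; exact ⟨s, hs, by simp⟩, by simp [hx, hsum]⟩
    · exact ⟨s, by simp [List.mem_flatMap]; exact ⟨s, hs, by simp⟩, by simp [hx, hsum]⟩

lemma pvFilter_pos (x P : Int) (hx : x > 0) :
    ∀ l : List (List Int), (∀ s ∈ l, s.sum ≤ P) →
      (l.flatMap (fun s => [s, x :: s])).filter (fun s => s.sum = x + P) =
        (l.filter (fun s => s.sum = P)).map (fun s => x :: s) := by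
  intro l
  induction l with
  | nil => simp
  | cons s l ih =>
    intro hle
    have hs : s.sum ≤ P := hle s (by simp)
    have h1 : ¬ (s.sum = x + P) := by omega
    simp only [List.flatMap_cons, List.filter_append, List.filter_cons, List.sum_cons,
      ih (fun t ht => hle t (by simp [ht]))]
    by_cases h2 : s.sum = P
    · simp [h1, h2, show ¬ x = 0 by omega]
    · have h3 : ¬ (x + s.sum = x + P) := by omega
      simp [h1, h2, h3]

lemma pvFilter_zero (P : Int) :
    ∀ l : List (List Int),
      (l.flatMap (fun s => [s, (0:Int) :: s])).filter (fun s => s.sum = P) =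
        (l.filter (fun s => s.sum = P)).flatMap (fun s => [s, (0:Int) :: s]) := by
  intro l
  induction l with
  | nil => simp
  | cons s l ih =>
    simp only [List.flatMap_cons, List.filter_append, List.filter_cons, List.sum_cons, ih]
    by_cases h2 : s.sum = P <;> simp [h2]

lemma pvFilter_neg (x P : Int) (hx : x < 0) :
    ∀ l : List (List Int), (∀ s ∈ l, s.sum ≤ P) →
      (l.flatMap (fun s => [s, x :: s])).filter (fun s => s.sum = P) =
        l.filter (fun s => s.sum = P) := by
  intro l
  induction l with
  | nil => simp
  | cons s l ih =>
    intro hle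
    have hs : s.sum ≤ P := hle s (by simp)
    have h1 : ¬ (x + s.sum = P) := by omega
    simp only [List.flatMap_cons, List.filter_append, List.filter_cons, List.sum_cons,
      ih (fun t ht => hle t (by simp [ht]))]
    by_cases h2 : s.sum = P <;> simp [h1, h2, show ¬ x = 0 by omega]

lemma pvL_filter (arr : List Int) :
    (pvL arr).filter (fun s => s.sum = pvP arr) = pvGen arr := by
  induction arr with
  | nil => simp [pvL, pvSubsetAt, pvGen, pvP]
  | cons x arr ih =>
    have hle := pvL_sum_le arr
    have hG : pvGen (x :: arr) =
        (if x > 0 then (pvGen arr).map (fun s => x :: s)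
         else if x = 0 then (pvGen arr).flatMap (fun s => [s, x :: s])
         else pvGen arr) := rfl
    rcases lt_trichotomy x 0 with h | h | h
    · have hP : pvP (x :: arr) = pvP arr := by rw [pvP_cons, if_neg (by omega)]
      rw [pvL_cons, hP, hG, if_neg (by omega), if_neg (by omega), ← ih]
      exact pvFilter_neg x (pvP arr) h (pvL arr) hle
    · subst h
      have hP : pvP ((0:Int) :: arr) = pvP arr := by rw [pvP_cons, if_neg (by omega)]
      rw [pvL_cons, hP, hG, if_neg (by omega), if_pos rfl, ← ih]
      exact pvFilter_zero (pvP arr) (pvL arr)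
    · have hP : pvP (x :: arr) = x + pvP arr := by rw [pvP_cons, if_pos h]
      rw [pvL_cons, hP, hG, if_pos h, ← ih]
      exact pvFilter_pos x (pvP arr) h (pvL arr) hle

lemma pvFoldMax_eq (l : List Int) (b p : Int)
    (hle : ∀ a ∈ l, a ≤ p) (hb : b ≤ p) (hmem : p ∈ l ∨ b = p) :
    l.foldl max b = p := by
  induction l generalizing b with
  | nil => simpa using hmem
  | cons a l ih =>
    have ha : a ≤ p := hle a (by simp)
    have hle' : ∀ x ∈ l, x ≤ p := fun x hx => hle x (by simp [hx])
    simp only [List.foldl_cons]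
    rcases hmem with h | h
    · rcases List.mem_cons.1 h with hpa | h
      · exact ih (max b a) hle' (by omega) (by right; omega)
      · exact ih (max b a) hle' (by omega) (Or.inl h)
    · exact ih (max b a) hle' (by omega) (by right; omega)

lemma pvLe_foldl_max (l : List Int) (b : Int) : b ≤ l.foldl max b := by
  induction l generalizing b with
  | nil => simp
  | cons a l ih => simp only [List.foldl_cons]; exact le_trans (le_max_left b a) (ih (max b a))

lemma pvFold_some (l : List (List Int)) :
    ∀ (b : Int) (acc : List (List Int)),
      l.foldl pvStep (some b, acc) =
        (some ((l.map List.sum).foldl max b),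
          (if (l.map List.sum).foldl max b = b then acc else []) ++
            l.filter (fun t => t.sum = (l.map List.sum).foldl max b)) := by
  induction l with
  | nil => intro b acc; simp
  | cons s l ih =>
    intro b acc
    have hM : ∀ c : Int, c ≤ ((s :: l).map List.sum).foldl max c := fun c => pvLe_foldl_max _ c
    simp only [List.foldl_cons, List.map_cons]
    rcases lt_trichotomy s.sum b with h | h | h
    · -- current < b : state unchanged
      have hstep : pvStep (some b, acc) s = (some b, acc) := by
        simp [pvStep, show ¬ s.sum > b by omega, show ¬ s.sum = b by omega]
      rw [hstep, ih b acc]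
      have hmax : max b s.sum = b := by omega
      have hMb : b ≤ (l.map List.sum).foldl max b := pvLe_foldl_max _ b
      simp only [hmax]
      have hns : ¬ (s.sum = (l.map List.sum).foldl max b) := by omega
      simp [List.filter_cons, hns]
    · -- current = b : append
      have hstep : pvStep (some b, acc) s = (some b, acc ++ [s]) := by
        simp [pvStep, h]
      rw [hstep, ih b (acc ++ [s])]
      have hmax : max b s.sum = b := by omega
      simp only [hmax]
      have hMb : b ≤ (l.map List.sum).foldl max b := pvLe_foldl_max _ b
      by_cases hEq : (l.map List.sum).foldl max b = b
      · simp [hEq, List.filter_cons, h]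
      · have hns : ¬ (s.sum = (l.map List.sum).foldl max b) := by omega
        simp [hEq, List.filter_cons, hns]
    · -- current > b : reset
      have hstep : pvStep (some b, acc) s = (some s.sum, [s]) := by
        simp [pvStep, h]
      rw [hstep, ih s.sum [s]]
      have hmax : max b s.sum = s.sum := by omega
      simp only [hmax]
      have hMs : s.sum ≤ (l.map List.sum).foldl max s.sum := pvLe_foldl_max _ s.sum
      by_cases hEq : (l.map List.sum).foldl max s.sum = s.sum
      · simp [hEq, List.filter_cons, show ¬ s.sum = b by omega]
      · have hnb : ¬ ((l.map List.sum).foldl max s.sum = b) := by omega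
        have hns : ¬ (s.sum = (l.map List.sum).foldl max s.sum) := fun hc => hEq hc.symm
        simp [hEq, hnb, List.filter_cons, hns]

lemma pvA_char (arr : List Int) :
    (pvL arr).foldl pvStep (none, []) = (some (pvP arr), pvGen arr) := by
  obtain ⟨s, L', hL⟩ : ∃ s L', pvL arr = s :: L' := by
    cases h : pvL arr with
    | nil => exact absurd h (pvL_ne_nil arr)
    | cons a l => exact ⟨a, l, rfl⟩
  have hmem_sub : ∀ t ∈ pvL arr, t.sum ≤ pvP arr := pvL_sum_le arr
  rw [hL, List.foldl_cons]
  have hstep : pvStep (none, []) s = (some s.sum, [s]) := rfl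
  rw [hstep, pvFold_some L' s.sum [s]]
  have hMP : (L'.map List.sum).foldl max s.sum = pvP arr := by
    apply pvFoldMax_eq
    · intro a ha
      obtain ⟨t, ht, rfl⟩ := List.mem_map.1 ha
      exact hmem_sub t (hL ▸ List.mem_cons_of_mem _ ht)
    · exact hmem_sub s (hL ▸ List.mem_cons_self)
    · obtain ⟨t, ht, htP⟩ := pvL_mem_P arr
      rw [hL] at ht
      rcases List.mem_cons.1 ht with rfl | ht
      · right; exact htP
      · left; exact List.mem_map.2 ⟨t, ht, htP⟩
  rw [hMP]
  have hfil : (pvL arr).filter (fun t => t.sum = pvP arr) = pvGen arr := pvL_filter arr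
  rw [hL, List.filter_cons] at hfil
  by_cases hc : s.sum = pvP arr
  · simp only [hc, decide_true, if_pos] at hfil
    simp [hc, ← hfil]
  · simp only [hc, decide_false, Bool.false_eq_true, if_false] at hfil
    have hnc : ¬ (pvP arr = s.sum) := fun h => hc h.symm
    simp [hnc, hfil]

-- ===== VERDICT (by name: the statement is the Claim_ definition above) =====
theorem find_max_sum_subsets_spec : Claim_equal_find_max_sum_subsets := by
  intro arr _
  show find_max_sum_subsets arr = find_max_sum_subsets_alt arr
  have h1 : (1 <<< arr.length) = 2 ^ arr.length := by rw [Nat.shiftLeft_eq, one_mul]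
  have h2 : (List.range (2 ^ arr.length)).foldl (fun st i => pvStep st (pvSubsetAt arr i))
      ((none : Option Int), ([] : List (List Int))) = (pvL arr).foldl pvStep (none, []) := by
    rw [pvL, List.foldl_map]
  simp only [find_max_sum_subsets, find_max_sum_subsets_alt, h1, h2, pvA_char]
  simp [pvP]
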